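-- pv_equiv track=rewrite | github.com/edoron777/GetHiredAlly | backend/common/detection/master_detector.py | _organize_by_category
-- ===== SOURCE A (Python) =====
-- from typing import List, Dict, Any, Optional
--
-- def _organize_by_category(issues: List[Dict[str, Any]]) -> Dict[str, List[Dict[str, Any]]]:
--     """Organize issues by category based on issue_type prefix."""
--     categories = {}
--
--     for issue in issues:
--         issue_type = issue.get('issue_type', 'UNKNOWN')
--
--         # Extract category from issue_type (e.g., "CONTENT_MISSING_SUMMARY" -> "content")
--         if '_' in issue_type:
--             category = issue_type.split('_')[0].lower()
--         else:
--             category = 'other'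
--
--         if category not in categories:
--             categories[category] = []
--         categories[category].append(issue)
--
--     return categories
-- ===== SOURCE B (Python) =====
-- from typing import List, Dict, Any
--
-- def _organize_by_category(issues: List[Dict[str, Any]]) -> Dict[str, List[Dict[str, Any]]]:
--     """Group issues by issue_type-prefix category: compute every key once,
--     then build the whole result in a single dict comprehension."""
--     def category_of(issue):
--         issue_type = issue.get('issue_type', 'UNKNOWN')
--         return issue_type.split('_')[0].lower() if '_' in issue_type else 'other'
--
--     keys = [category_of(issue) for issue in issues]
--     return {c: [issue for issue, k in zip(issues, keys) if k == c]
--             for c in dict.fromkeys(keys)}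
-- ===== Notes on version B (the rewrite author's own statement) =====
-- stated objective: alternative
-- what changed: B precomputes each issue's category into a key list and then builds the whole result in one dict comprehension over the first-occurrence-deduplicated keys, filtering the issue list per category, instead of A's single pass that mutates a dict entry by entry.
import Mathlib
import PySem

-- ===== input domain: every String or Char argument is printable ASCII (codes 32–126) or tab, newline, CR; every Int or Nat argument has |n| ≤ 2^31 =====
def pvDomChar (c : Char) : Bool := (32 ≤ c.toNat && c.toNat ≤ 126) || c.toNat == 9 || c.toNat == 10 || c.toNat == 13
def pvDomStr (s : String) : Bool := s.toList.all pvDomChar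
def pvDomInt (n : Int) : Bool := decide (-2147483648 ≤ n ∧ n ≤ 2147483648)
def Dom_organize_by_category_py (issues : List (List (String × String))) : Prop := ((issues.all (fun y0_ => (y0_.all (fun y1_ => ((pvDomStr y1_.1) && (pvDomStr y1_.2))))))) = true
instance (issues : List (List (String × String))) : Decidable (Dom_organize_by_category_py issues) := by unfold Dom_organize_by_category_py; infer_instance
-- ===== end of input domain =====

-- B groups the issues in one dict comprehension over the deduplicated precomputed keys
-- instead of A's incremental dict-mutation loop (alternative decomposition, not faster).

-- ===== PORT A =====
-- Literal port of A: fold over the issues, mutating an insertion-ordered dict.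
-- '(split? … "_").getD []' is exact: split? is none only for an empty separator.
def organize_by_category_py (issues : List (List (String × String))) : List (String × List (List (String × String))) :=
  (issues.foldl
    (fun (categories : PySem.Dict String (List (List (String × String)))) issue =>
      let issue_type := PySem.Dict.getD (⟨issue⟩ : PySem.Dict String String) "issue_type" "UNKNOWN"
      let category :=
        if PySem.Str.isIn "_" issue_type then
          PySem.Str.lower (PySem.List.pyGetD ((PySem.Str.split? issue_type "_").getD []) 0 "")
        else "other"
      let categories :=
        if categories.contains category then categories
        else categories.insert category []
      categories.insert category (categories.getD category [] ++ [issue]))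
    PySem.Dict.empty).items

-- ===== PORT B =====
-- B's helper 'category_of' (same extraction rule as A computes inline).
def pvCategoryOf (issue : List (String × String)) : String :=
  let issue_type := PySem.Dict.getD (⟨issue⟩ : PySem.Dict String String) "issue_type" "UNKNOWN"
  if PySem.Str.isIn "_" issue_type then
    PySem.Str.lower (PySem.List.pyGetD ((PySem.Str.split? issue_type "_").getD []) 0 "")
  else "other"

-- Port of B: precompute all keys, then one comprehension over dict.fromkeys(keys).
def organize_by_category_py_alt (issues : List (List (String × String))) : List (String × List (List (String × String))) :=
  let keys := issues.map pvCategoryOf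
  (PySem.List.dedup keys).map
    (fun c => (c, ((issues.zip keys).filter (fun p => p.2 == c)).map (·.1)))

-- ===== PRECONDITION & SPEC =====
def Spec_organize_by_category_py (issues : List (List (String × String))) (out : List (String × List (List (String × String)))) : Prop := out = organize_by_category_py_alt issues
instance (issues : List (List (String × String))) (out : List (String × List (List (String × String)))) : Decidable (Spec_organize_by_category_py issues out) := by unfold Spec_organize_by_category_py; infer_instance

-- ===== CLAIM (what is proved, stated in full; the proofs are below) =====
def Claim_equal_organize_by_category_py : Prop := ∀ (issues : List (List (String × String))), Dom_organize_by_category_py issues → Spec_organize_by_category_py issues (organize_by_category_py issues)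

-- ===== LEMMAS AND PROOFS =====

-- The common grouped shape both ports compute.
def pvRep (xs : List (List (String × String))) : List (String × List (List (String × String))) :=
  (PySem.List.dedup (xs.map pvCategoryOf)).map
    (fun c => (c, xs.filter (fun i => pvCategoryOf i == c)))

-- A's loop body with the category already extracted.
def pvStep (cats : PySem.Dict String (List (List (String × String))))
    (k : String) (issue : List (String × String)) :
    PySem.Dict String (List (List (String × String))) :=
  let cats := if cats.contains k then cats else cats.insert k []
  cats.insert k (cats.getD k [] ++ [issue])

lemma pvFind_map {ν : Type} (l : List String) (f : String → ν) (k : String) (hk : k ∈ l) :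
    (l.map (fun c => (c, f c))).find? (fun p => p.1 == k) = some (k, f k) := by
  induction l with
  | nil => cases hk
  | cons c l ih =>
    by_cases h : c = k
    · subst h; simp
    · have hk' : k ∈ l := by
        rcases List.mem_cons.mp hk with h' | h'
        · exact absurd h'.symm h
        · exact h'
      simp [h, ih hk']

lemma pvFilter_nil (xs : List (List (String × String))) (k : String)
    (hk : k ∉ xs.map pvCategoryOf) :
    xs.filter (fun i => pvCategoryOf i == k) = [] := by
  rw [List.filter_eq_nil_iff]
  intro i hi
  simp only [beq_iff_eq]
  intro h
  exact hk (h ▸ List.mem_map_of_mem hi)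

lemma pvZipFilter (xs : List (List (String × String))) (c : String) :
    ((xs.zip (xs.map pvCategoryOf)).filter (fun p => p.2 == c)).map (·.1)
      = xs.filter (fun i => pvCategoryOf i == c) := by
  induction xs with
  | nil => rfl
  | cons x xs ih =>
    by_cases h : pvCategoryOf x == c
    · simp [h, ih]
    · simp [h, ih]

lemma pvContains_rep (xs : List (List (String × String))) (k : String) :
    (PySem.Dict.contains (⟨pvRep xs⟩ : PySem.Dict String (List (List (String × String)))) k)
      = decide (k ∈ xs.map pvCategoryOf) := by
  by_cases hk : k ∈ xs.map pvCategoryOf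
  · simp only [PySem.Dict.contains, pvRep, hk, decide_true]
    rw [List.any_eq_true]
    exact ⟨(k, _), List.mem_map_of_mem ((PySem.Set.mem_ofList _ _).mpr hk), by simp⟩
  · simp only [PySem.Dict.contains, pvRep, hk, decide_false]
    rw [List.any_eq_false]
    rintro ⟨c, v⟩ hm
    rcases List.mem_map.mp hm with ⟨c', hc', hce⟩
    cases hce
    simp only [beq_iff_eq]
    intro h
    exact hk (h ▸ (PySem.Set.mem_ofList _ _).mp hc')

lemma pvStep_rep (xs : List (List (String × String))) (x : List (String × String)) :
    (pvStep (⟨pvRep xs⟩ : PySem.Dict String (List (List (String × String)))) (pvCategoryOf x) x).items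
      = pvRep (xs ++ [x]) := by
  by_cases hk : pvCategoryOf x ∈ xs.map pvCategoryOf
  · have hc : (PySem.Dict.contains (⟨pvRep xs⟩ : PySem.Dict String (List (List (String × String)))) (pvCategoryOf x)) = true := by
      rw [pvContains_rep]; simpa using hk
    have hkd : pvCategoryOf x ∈ PySem.List.dedup (xs.map pvCategoryOf) := by
      simpa [PySem.Set.mem_ofList] using hk
    have hget : PySem.Dict.getD (⟨pvRep xs⟩ : PySem.Dict String (List (List (String × String)))) (pvCategoryOf x) []
        = xs.filter (fun i => pvCategoryOf i == pvCategoryOf x) := by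
      simp only [PySem.Dict.getD, PySem.Dict.get?, pvRep]
      rw [pvFind_map _ _ _ hkd]
      rfl
    have hded : PySem.List.dedup (xs.map pvCategoryOf ++ [pvCategoryOf x])
        = PySem.List.dedup (xs.map pvCategoryOf) := by
      rw [PySem.List.dedup_eq_ofList, PySem.List.dedup_eq_ofList, PySem.Set.ofList_append_singleton,
        PySem.Set.add_of_mem (by simpa [PySem.Set.mem_ofList] using hk)]
    simp only [pvStep, hc, if_true, PySem.Dict.insert, hget]
    simp only [pvRep, List.map_append, List.map_cons, List.map_nil]
    rw [hded, List.map_map]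
    apply List.map_congr_left
    intro c hc'
    by_cases hck : c = pvCategoryOf x
    · subst hck
      simp [List.filter_append]
    · have h1 : (c == pvCategoryOf x) = false := by simpa using hck
      have h2 : (pvCategoryOf x == c) = false := by simpa using fun h => hck h.symm
      simp [Function.comp, h1, h2, List.filter_append]
  · have hc : (PySem.Dict.contains (⟨pvRep xs⟩ : PySem.Dict String (List (List (String × String)))) (pvCategoryOf x)) = false := by
      rw [pvContains_rep]; simpa using hk
    have hnotrep : ∀ p ∈ pvRep xs, (p.1 == pvCategoryOf x) = false := by
      rintro ⟨c, v⟩ hm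
      rcases List.mem_map.mp hm with ⟨c', hc', hce⟩
      cases hce
      simp only [beq_eq_false_iff_ne, ne_eq]
      intro h
      exact hk (h ▸ (PySem.Set.mem_ofList _ _).mp hc')
    have hc2 : (PySem.Dict.contains (⟨pvRep xs ++ [(pvCategoryOf x, [])]⟩ : PySem.Dict String (List (List (String × String)))) (pvCategoryOf x)) = true := by
      simp [PySem.Dict.contains]
    have hget : PySem.Dict.getD (⟨pvRep xs ++ [(pvCategoryOf x, [])]⟩ : PySem.Dict String (List (List (String × String)))) (pvCategoryOf x) [] = [] := by
      simp only [PySem.Dict.getD, PySem.Dict.get?]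
      rw [List.find?_append]
      rw [List.find?_eq_none.mpr (fun p hp => by simp [hnotrep p hp])]
      simp [List.find?]
    have hded : PySem.List.dedup (xs.map pvCategoryOf ++ [pvCategoryOf x])
        = PySem.List.dedup (xs.map pvCategoryOf) ++ [pvCategoryOf x] := by
      rw [PySem.List.dedup_eq_ofList, PySem.Set.ofList_append_singleton,
        PySem.Set.add_of_not_mem (by simpa [PySem.Set.mem_ofList] using hk), PySem.List.dedup_eq_ofList]
    simp only [pvStep, hc, if_false, Bool.false_eq_true, PySem.Dict.insert, hc2, if_true, hget]
    simp only [List.nil_append, List.map_append, List.map_cons, List.map_nil]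
    rw [List.map_congr_left (l := pvRep xs) (g := id) (fun p hp => by simp [hnotrep p hp])]
    simp only [List.map_id, pvRep]
    simp only [List.map_append, List.map_cons, List.map_nil]
    rw [hded, List.map_append]
    congr 1
    · apply List.map_congr_left
      intro c hc'
      have h2 : (pvCategoryOf x == c) = false := by
        simp only [beq_eq_false_iff_ne, ne_eq]
        intro h
        exact hk (by simpa [PySem.Set.mem_ofList, ← h] using hc')
      simp [List.filter_append, h2]
    · simp [List.filter_append, List.filter_cons, pvFilter_nil xs _ hk]

lemma pvA_eq (issues : List (List (String × String))) :
    organize_by_category_py issues = pvRep issues := by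
  unfold organize_by_category_py
  have hfun : (fun (categories : PySem.Dict String (List (List (String × String)))) issue =>
      let issue_type := PySem.Dict.getD (⟨issue⟩ : PySem.Dict String String) "issue_type" "UNKNOWN"
      let category :=
        if PySem.Str.isIn "_" issue_type then
          PySem.Str.lower (PySem.List.pyGetD ((PySem.Str.split? issue_type "_").getD []) 0 "")
        else "other"
      let categories :=
        if categories.contains category then categories
        else categories.insert category []
      categories.insert category (categories.getD category [] ++ [issue]))
      = fun cats issue => pvStep cats (pvCategoryOf issue) issue := rfl
  rw [hfun]
  induction issues using List.reverseRecOn with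
  | nil => rfl
  | append_singleton xs x ih =>
    rw [List.foldl_append, List.foldl_cons, List.foldl_nil]
    have hd : (xs.foldl (fun cats issue => pvStep cats (pvCategoryOf issue) issue) PySem.Dict.empty)
        = (⟨pvRep xs⟩ : PySem.Dict String (List (List (String × String)))) := by
      cases hfold : xs.foldl (fun cats issue => pvStep cats (pvCategoryOf issue) issue) PySem.Dict.empty with
      | mk items => exact congrArg PySem.Dict.mk (by simpa [hfold] using ih)
    rw [hd, pvStep_rep]

lemma pvB_eq (issues : List (List (String × String))) :
    organize_by_category_py_alt issues = pvRep issues := by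
  unfold organize_by_category_py_alt pvRep
  apply List.map_congr_left
  intro c _
  rw [pvZipFilter]

-- ===== VERDICT (by name: the statement is the Claim_ definition above) =====
theorem organize_by_category_py_spec : Claim_equal_organize_by_category_py := by
  intro issues _
  unfold Spec_organize_by_category_py
  rw [pvA_eq, pvB_eq]
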